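-- pv_equiv track=rewrite | github.com/jensbrauer/wordpuzzle | run.py | make_strings
-- ===== SOURCE A (Python) =====
-- def make_strings(rows):
--     string_list = []
--     for row in rows:
--         string_list.append(''.join(row))
--     for i in range(len(rows[0])):
--         col_string = []
--         for row in rows:
--             col_string.append(row[i])
--         string_list.append(''.join(col_string))
--     return string_list
-- ===== SOURCE B (Python) =====
-- def make_strings(rows):
--     ncols = len(rows[0])
--     out = []
--     cols = [[] for _ in range(ncols)]
--     for row in rows:
--         out.append(''.join(row))
--         for c, x in zip(cols, row):
--             c.append(x)
--     return out + [''.join(c) for c in cols]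
-- ===== Notes on version B (the rewrite author's own statement) =====
-- stated objective: alternative
-- what changed: Single fused pass over the rows that appends each row string and extends every column accumulator via zip, instead of A's separate column loop that re-scans all rows once per column.
import Mathlib
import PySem

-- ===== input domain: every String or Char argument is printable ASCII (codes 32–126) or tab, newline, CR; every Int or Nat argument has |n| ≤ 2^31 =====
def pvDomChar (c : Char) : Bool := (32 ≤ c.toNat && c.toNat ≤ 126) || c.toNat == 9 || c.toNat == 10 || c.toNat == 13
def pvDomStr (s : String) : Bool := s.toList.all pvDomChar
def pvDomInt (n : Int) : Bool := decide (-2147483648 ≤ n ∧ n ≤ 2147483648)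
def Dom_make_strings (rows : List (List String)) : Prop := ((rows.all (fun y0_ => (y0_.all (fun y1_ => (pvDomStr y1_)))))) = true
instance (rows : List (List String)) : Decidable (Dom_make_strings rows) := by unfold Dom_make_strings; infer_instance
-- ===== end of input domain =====

-- B fuses A's two passes into one row-major traversal (alternative decomposition): it appends each
-- row string and extends each column accumulator via zip, instead of re-scanning all rows per column.


-- ===== PORT A =====
-- string_list = [''.join(row) for-loop]; then for i in range(len(rows[0])): append ''.join(col)
def make_strings (rows : List (List String)) : List String :=
  (PySem.List.pyRange 0 ((PySem.List.pyGetD rows 0 []).length : Int)).foldl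
    (fun acc i =>
      acc ++ [PySem.Str.join "" (rows.foldl (fun c row => c ++ [PySem.List.pyGetD row i ""]) [])])
    (rows.foldl (fun acc row => acc ++ [PySem.Str.join "" row]) [])

-- ===== PORT B =====
-- single pass: state = (row strings so far, column accumulators), columns extended via zip
def make_strings_alt (rows : List (List String)) : List String :=
  let ncols := (PySem.List.pyGetD rows 0 []).length
  let r := rows.foldl
    (fun p row => (p.1 ++ [PySem.Str.join "" row], (p.2.zip row).map (fun cx => cx.1 ++ [cx.2])))
    (([], List.replicate ncols []) : List String × List (List String))
  r.1 ++ r.2.map (fun c => PySem.Str.join "" c)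

-- ===== PRECONDITION & SPEC =====
-- Pre_ excludes exactly the inputs on which A raises IndexError: empty rows (rows[0]),
-- and grids where some row is shorter than the first row (row[i] in the column loop).
def Pre_make_strings (rows : List (List String)) : Prop :=
  rows ≠ [] ∧ ∀ r ∈ rows, (rows.headD []).length ≤ r.length
instance (rows : List (List String)) : Decidable (Pre_make_strings rows) := by unfold Pre_make_strings; infer_instance
def pvWitness_make_strings : List (List String) := [["a","b"],["c","d"]]
def Spec_make_strings (rows : List (List String)) (out : List String) : Prop := out = make_strings_alt rows
instance (rows : List (List String)) (out : List String) : Decidable (Spec_make_strings rows out) := by unfold Spec_make_strings; infer_instance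

-- ===== CLAIM (what is proved, stated in full; the proofs are below) =====
def Claim_equal_make_strings : Prop := ∀ (rows : List (List String)), Dom_make_strings rows → Pre_make_strings rows → Spec_make_strings rows (make_strings rows)

-- ===== LEMMAS AND PROOFS =====

-- one zip-extension step, entrywise
theorem colstep_getD (cs : List (List String)) (row : List String) (k : Nat)
    (hk : k < cs.length) (hk2 : k < row.length) :
    ((cs.zip row).map (fun cx => cx.1 ++ [cx.2])).getD k [] = cs.getD k [] ++ [row.getD k ""] := by
  simp [List.getD_eq_getElem?_getD, hk, hk2, Nat.lt_min.mpr ⟨hk, hk2⟩]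

-- invariant of B's column fold
theorem colfold (rows : List (List String)) (n : Nat) (cs : List (List String))
    (hcs : cs.length = n) (h : ∀ r ∈ rows, n ≤ r.length) :
    rows.foldl (fun p2 row => ((p2.zip row).map (fun cx => cx.1 ++ [cx.2]))) cs
      = (List.range n).map (fun k => cs.getD k [] ++ rows.map (fun r => PySem.List.pyGetD r (k : Int) "")) := by
  induction rows generalizing cs with
  | nil =>
    apply List.ext_getElem (by simp [hcs])
    intro i h1 h2
    simp only [List.foldl_nil] at h1
    simp [List.getD_eq_getElem?_getD, List.getElem?_eq_getElem h1]
  | cons row rest ih =>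
    have hrow : n ≤ row.length := h row (by simp)
    have hlen : ((cs.zip row).map (fun cx => cx.1 ++ [cx.2])).length = n := by
      simp [hcs]; omega
    rw [List.foldl_cons, ih _ hlen (fun r hr => h r (by simp [hr]))]
    apply List.map_congr_left
    intro k hk
    rw [List.mem_range] at hk
    rw [colstep_getD cs row k (by omega) (by omega)]
    simp [PySem.List.pyGetD_natCast]

-- ===== VERDICT (by name: the statement is the Claim_ definition above) =====
theorem make_strings_spec : Claim_equal_make_strings := by
  intro rows _ hpre
  obtain ⟨hne, hlen⟩ := hpre
  obtain ⟨a, l, rfl⟩ : ∃ a l, rows = a :: l := by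
    cases rows with
    | nil => exact absurd rfl hne
    | cons a l => exact ⟨a, l, rfl⟩
  have hn : PySem.List.pyGetD (a :: l) 0 [] = a := by
    simp [PySem.List.pyGetD, PySem.List.pyGet?, PySem.List.pyIdx?]
  show make_strings (a :: l) = make_strings_alt (a :: l)
  simp only [make_strings, make_strings_alt, hn]
  simp only [PySem.List.foldl_prod_mk (fun x (row : List String) => x ++ [PySem.Str.join "" row])
      (fun y (row : List String) => (y.zip row).map (fun cx => cx.1 ++ [cx.2]))
      (a :: l) [] (List.replicate a.length [])]
  rw [colfold (a :: l) a.length (List.replicate a.length [])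
        (by simp) (by simpa [List.headD] using hlen)]
  simp only [PySem.List.foldl_append_singleton_eq_map, List.nil_append,
    PySem.List.pyRange_zero_natCast, List.foldl_map, List.map_map]
  congr 1
  apply List.map_congr_left
  intro k hk
  rw [List.mem_range] at hk
  simp [List.getD_eq_getElem?_getD, List.getElem?_replicate, hk]
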